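-- pv_equiv track=rewrite | github.com/zhaojuanwendy/CVDPrediction | src/classification/run_multitask_LR.py | get_features_with_time_win
-- ===== SOURCE A (Python) =====
-- def get_features_with_time_win(feature_list,time_feature_beg,timesteps, feature_size):
--     f_time = feature_list[time_feature_beg:(len(feature_list))]
--     f_static = feature_list[0:time_feature_beg]
--     multi_task_featues = []
--     for i in range(timesteps):
--         f_time_t = [] # features for each time step
--         for j in range(feature_size):
--             f_time_t.append(f_time[i + j * timesteps])  # all variables at time window t=i
--         f_mix_t = f_static + f_time_t # concat the time variable with static variables as dataset1
--         multi_task_featues.append(f_mix_t)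
--     return multi_task_featues
-- ===== SOURCE B (Python) =====
-- def get_features_with_time_win(feature_list, time_feature_beg, timesteps, feature_size):
--     f_static = feature_list[:time_feature_beg]
--     f_time = feature_list[time_feature_beg:]
--     if timesteps <= 0:
--         return []
--     rows = [f_time[j * timesteps:(j + 1) * timesteps] for j in range(feature_size)]
--     return [f_static + [row[i] for row in rows] for i in range(timesteps)]
-- ===== Notes on version B (the rewrite author's own statement) =====
-- stated objective: alternative
-- what changed: B pre-slices the flat time-feature list into feature-major rows and transposes them per timestep, instead of A's nested per-timestep loop gathering f_time[i + j*timesteps] by index arithmetic.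
import Mathlib
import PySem

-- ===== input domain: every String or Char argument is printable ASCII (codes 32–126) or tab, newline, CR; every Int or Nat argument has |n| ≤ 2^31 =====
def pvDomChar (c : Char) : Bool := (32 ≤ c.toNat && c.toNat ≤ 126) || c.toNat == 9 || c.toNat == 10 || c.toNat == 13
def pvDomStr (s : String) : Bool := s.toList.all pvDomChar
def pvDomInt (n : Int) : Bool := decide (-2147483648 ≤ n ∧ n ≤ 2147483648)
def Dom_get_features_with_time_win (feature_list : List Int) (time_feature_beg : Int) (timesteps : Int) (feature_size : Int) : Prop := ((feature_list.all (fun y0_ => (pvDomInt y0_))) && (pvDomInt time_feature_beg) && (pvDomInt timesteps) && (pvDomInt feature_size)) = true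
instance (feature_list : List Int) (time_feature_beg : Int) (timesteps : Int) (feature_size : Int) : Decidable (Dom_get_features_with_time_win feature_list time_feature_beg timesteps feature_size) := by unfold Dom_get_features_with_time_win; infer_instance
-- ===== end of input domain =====

-- B replaces A's nested per-timestep index-gathering loop by slicing the time features into
-- feature-major rows and transposing them per timestep; objective: alternative decomposition (same cost).

-- ===== PORT A =====
-- literal port of A; f_time[i + j * timesteps] is pyGetD (the IndexError case is excluded by Pre_)
def get_features_with_time_win (feature_list : List Int) (time_feature_beg : Int) (timesteps : Int) (feature_size : Int) : List (List Int) :=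
  let f_time := PySem.List.slice feature_list (some time_feature_beg) (some (feature_list.length : Int))
  let f_static := PySem.List.slice feature_list (some 0) (some time_feature_beg)
  (PySem.List.pyRange 0 timesteps 1).foldl (fun acc i =>
    let f_time_t := (PySem.List.pyRange 0 feature_size 1).foldl
      (fun ft j => ft ++ [PySem.List.pyGetD f_time (i + j * timesteps) 0]) []
    acc ++ [f_static ++ f_time_t]) []

-- ===== PORT B =====
-- literal port of Source B; row[i] is pyGetD (the IndexError case is excluded by Pre_)
def get_features_with_time_win_alt (feature_list : List Int) (time_feature_beg : Int) (timesteps : Int) (feature_size : Int) : List (List Int) :=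
  let f_static := PySem.List.slice feature_list (some 0) (some time_feature_beg)
  let f_time := PySem.List.slice feature_list (some time_feature_beg) none
  if timesteps ≤ 0 then []
  else
    let rows := (PySem.List.pyRange 0 feature_size 1).map
      (fun j => PySem.List.slice f_time (some (j * timesteps)) (some ((j + 1) * timesteps)))
    (PySem.List.pyRange 0 timesteps 1).map (fun i => f_static ++ rows.map (fun row => PySem.List.pyGetD row i 0))

-- ===== PRECONDITION & SPEC =====
-- Pre_ excludes exactly the inputs on which A raises IndexError: both loops run (positive
-- timesteps and feature_size) and f_time is shorter than timesteps*feature_size.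
def Pre_get_features_with_time_win (feature_list : List Int) (time_feature_beg : Int) (timesteps : Int) (feature_size : Int) : Prop :=
  timesteps ≤ 0 ∨ feature_size ≤ 0 ∨
    timesteps * feature_size ≤ ((PySem.List.slice feature_list (some time_feature_beg) none).length : Int)
instance (feature_list : List Int) (time_feature_beg : Int) (timesteps : Int) (feature_size : Int) : Decidable (Pre_get_features_with_time_win feature_list time_feature_beg timesteps feature_size) := by unfold Pre_get_features_with_time_win; infer_instance

def pvWitness_get_features_with_time_win : List Int × Int × Int × Int := ([7, 1, 2, 3, 4, 5, 6], 1, 2, 3)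

def Spec_get_features_with_time_win (feature_list : List Int) (time_feature_beg : Int) (timesteps : Int) (feature_size : Int) (out : List (List Int)) : Prop := out = get_features_with_time_win_alt feature_list time_feature_beg timesteps feature_size
instance (feature_list : List Int) (time_feature_beg : Int) (timesteps : Int) (feature_size : Int) (out : List (List Int)) : Decidable (Spec_get_features_with_time_win feature_list time_feature_beg timesteps feature_size out) := by unfold Spec_get_features_with_time_win; infer_instance

-- ===== CLAIM (what is proved, stated in full; the proofs are below) =====
def Claim_equal_get_features_with_time_win : Prop := ∀ (feature_list : List Int) (time_feature_beg : Int) (timesteps : Int) (feature_size : Int), Dom_get_features_with_time_win feature_list time_feature_beg timesteps feature_size → Pre_get_features_with_time_win feature_list time_feature_beg timesteps feature_size → Spec_get_features_with_time_win feature_list time_feature_beg timesteps feature_size (get_features_with_time_win feature_list time_feature_beg timesteps feature_size)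

-- ===== LEMMAS AND PROOFS =====

-- A's slice feature_list[tb:len(feature_list)] equals B's feature_list[tb:]
lemma slice_len_eq_none (xs : List Int) (a : Int) :
    PySem.List.slice xs (some a) (some (xs.length : Int)) = PySem.List.slice xs (some a) none := by
  simp [PySem.List.slice, PySem.List.clampIdx]
  split_ifs <;> omega

-- pointwise: indexing feature-major row j at timestep i equals flat indexing at i + j*ts
lemma point_eq (f_time : List Int) (ts fs i j : Int)
    (hts : 0 < ts) (hi : 0 ≤ i) (hi' : i < ts) (hj : 0 ≤ j) (hj' : j < fs)
    (hlen : ts * fs ≤ (f_time.length : Int)) :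
    PySem.List.pyGetD (PySem.List.slice f_time (some (j * ts)) (some ((j + 1) * ts))) i 0
      = PySem.List.pyGetD f_time (i + j * ts) 0 := by
  have hp0 : 0 ≤ j * ts := mul_nonneg hj hts.le
  have hexp : (j + 1) * ts = j * ts + ts := by ring
  have hub : j * ts + ts ≤ (f_time.length : Int) := by
    rw [← hexp]
    calc (j + 1) * ts ≤ fs * ts := mul_le_mul_of_nonneg_right (by omega) hts.le
    _ = ts * fs := by ring
    _ ≤ _ := hlen
  rw [hexp]
  generalize hP : j * ts = p at hp0 hub
  have hq0 : 0 ≤ p + ts := by omega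
  rw [PySem.List.slice_toNat f_time hp0 hq0]
  have h1 : (p + ts).toNat - p.toNat = ts.toNat := by omega
  rw [h1]
  rw [PySem.List.pyGetD_eq_getElem _ _ hi (by simp; omega)]
  rw [PySem.List.pyGetD_eq_getElem _ _ (by omega) (by omega)]
  rw [List.getElem_take, List.getElem_drop]
  congr 1
  omega

-- the main equivalence, with Pre_ spelled out
lemma ports_eq (fl : List Int) (tb ts fs : Int)
    (hpre : ts ≤ 0 ∨ fs ≤ 0 ∨ ts * fs ≤ ((PySem.List.slice fl (some tb) none).length : Int)) :
    get_features_with_time_win fl tb ts fs = get_features_with_time_win_alt fl tb ts fs := by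
  unfold get_features_with_time_win get_features_with_time_win_alt
  simp only [PySem.List.foldl_append_singleton_eq_map, List.nil_append, List.map_map]
  rw [slice_len_eq_none]
  by_cases hts : ts ≤ 0
  · rw [if_pos hts, PySem.List.pyRange_one_eq_nil hts]
    simp
  · rw [if_neg hts, not_le] at *
    apply List.map_congr_left
    intro i hi
    rw [PySem.List.mem_pyRange_one] at hi
    congr 1
    apply List.map_congr_left
    intro j hj
    rw [PySem.List.mem_pyRange_one] at hj
    rcases hpre with h | h | h
    · exact absurd hi.2 (by omega)
    · exact absurd hj.2 (by omega)
    · exact (point_eq _ ts fs i j hts hi.1 hi.2 hj.1 hj.2 h).symm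

-- ===== VERDICT (by name: the statement is the Claim_ definition above) =====
theorem get_features_with_time_win_spec : Claim_equal_get_features_with_time_win := by
  intro fl tb ts fs _ hpre
  unfold Spec_get_features_with_time_win
  unfold Pre_get_features_with_time_win at hpre
  exact ports_eq fl tb ts fs hpre
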